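-- pv_equiv track=rewrite | github.com/caiwet/InternImage | detection/tools/compute_tools.py | get_no_pred_id
-- ===== SOURCE A (Python) =====
-- def get_no_pred_id(max_score, cls_id=3047):
--     pred_id = {}
--     for (image_id, cat_id) in max_score.keys():
--         if image_id not in pred_id.keys():
--             pred_id[image_id] = []
--         pred_id[image_id].append(cat_id)
--     ids = []
--     for key in pred_id.keys():
--         if cls_id not in pred_id[key]:
--             ids.append(key)
--     return ids
-- ===== SOURCE B (Python) =====
-- def get_no_pred_id(max_score, cls_id=3047):
--     covered = {image_id for (image_id, cat_id) in max_score.keys() if cat_id == cls_id}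
--     return list(dict.fromkeys(
--         image_id for (image_id, cat_id) in max_score.keys() if image_id not in covered))
-- ===== Notes on version B (the rewrite author's own statement) =====
-- stated objective: idiomatic
-- what changed: Instead of building per-image category lists and scanning each, B computes the set of image_ids that have a cls_id prediction (set comprehension) and returns the ordered dedup (dict.fromkeys) of the image_ids outside that set.
import Mathlib
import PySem

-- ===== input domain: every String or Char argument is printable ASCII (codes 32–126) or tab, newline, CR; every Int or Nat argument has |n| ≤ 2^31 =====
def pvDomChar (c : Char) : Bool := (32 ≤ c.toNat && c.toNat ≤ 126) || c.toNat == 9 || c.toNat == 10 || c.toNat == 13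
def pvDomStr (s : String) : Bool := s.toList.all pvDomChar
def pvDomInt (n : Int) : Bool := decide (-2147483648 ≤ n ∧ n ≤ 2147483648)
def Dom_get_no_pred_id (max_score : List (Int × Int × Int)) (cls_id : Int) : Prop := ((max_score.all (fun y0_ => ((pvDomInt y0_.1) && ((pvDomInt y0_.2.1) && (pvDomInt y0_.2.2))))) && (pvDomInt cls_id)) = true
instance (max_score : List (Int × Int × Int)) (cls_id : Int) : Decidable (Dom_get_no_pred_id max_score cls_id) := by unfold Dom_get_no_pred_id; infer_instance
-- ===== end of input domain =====

-- B replaces A's per-image category lists + second membership scan by a set-difference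
-- formulation: the set of cls_id-covered image_ids, then ordered dedup of the rest (idiomatic).


-- ===== PORT A =====
-- max_score is a dict keyed by (image_id, cat_id); only keys are used, p.2.2 is the score value.
def get_no_pred_id (max_score : List (Int × Int × Int)) (cls_id : Int) : List Int :=
  let pred_id := max_score.foldl (fun d p =>
    let d := if d.contains p.1 then d else d.insert p.1 ([] : List Int)
    d.insert p.1 (d.getD p.1 [] ++ [p.2.1])) PySem.Dict.empty
  pred_id.keys.foldl (fun ids key =>
    if (pred_id.getD key []).contains cls_id then ids else ids ++ [key]) []

-- ===== PORT B =====
-- covered = {image_id for (image_id, cat_id) in keys if cat_id == cls_id};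
-- list(dict.fromkeys(...)) = PySem.List.dedup (first occurrences, in order).
def get_no_pred_id_alt (max_score : List (Int × Int × Int)) (cls_id : Int) : List Int :=
  let covered : PySem.Set Int :=
    PySem.Set.ofList ((max_score.filter (fun p => p.2.1 == cls_id)).map (fun p => p.1))
  PySem.List.dedup
    ((max_score.filter (fun p => !(PySem.Set.contains covered p.1))).map (fun p => p.1))

-- ===== PRECONDITION & SPEC =====
def Spec_get_no_pred_id (max_score : List (Int × Int × Int)) (cls_id : Int) (out : List Int) : Prop := out = get_no_pred_id_alt max_score cls_id
instance (max_score : List (Int × Int × Int)) (cls_id : Int) (out : List Int) : Decidable (Spec_get_no_pred_id max_score cls_id out) := by unfold Spec_get_no_pred_id; infer_instance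

-- ===== CLAIM (what is proved, stated in full; the proofs are below) =====
def Claim_equal_get_no_pred_id : Prop := ∀ (max_score : List (Int × Int × Int)) (cls_id : Int), Dom_get_no_pred_id max_score cls_id → Spec_get_no_pred_id max_score cls_id (get_no_pred_id max_score cls_id)

-- ===== LEMMAS AND PROOFS =====

-- A's build loop: keys are the image_ids in first-appearance order (Set.update of the
-- old keys), and cls_id lies in the list at k iff it did before or some (k, cls_id) pair occurs.
theorem buildA_char (cls_id : Int) (l : List (Int × Int × Int)) (dA : PySem.Dict Int (List Int)) :
    (l.foldl (fun d p =>
        let d := if d.contains p.1 then d else d.insert p.1 ([] : List Int)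
        d.insert p.1 (d.getD p.1 [] ++ [p.2.1])) dA).keys
      = PySem.Set.update dA.keys (l.map (fun p => p.1))
    ∧ ∀ k, ((l.foldl (fun d p =>
        let d := if d.contains p.1 then d else d.insert p.1 ([] : List Int)
        d.insert p.1 (d.getD p.1 [] ++ [p.2.1])) dA).getD k []).contains cls_id
      = ((dA.getD k []).contains cls_id || l.any (fun p => p.1 == k && p.2.1 == cls_id)) := by
  induction l generalizing dA with
  | nil => simp [PySem.Set.update]
  | cons p t ih =>
    simp only [List.foldl_cons, List.map_cons]
    by_cases hc : dA.contains p.1 = true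
    · simp only [hc, if_true]
      obtain ⟨ihk, ihv⟩ := ih (dA.insert p.1 (dA.getD p.1 [] ++ [p.2.1]))
      refine ⟨?_, ?_⟩
      · rw [ihk, PySem.Dict.keys_insert_of_contains _ _ hc]
        have hmem : p.1 ∈ dA.keys := (PySem.Dict.contains_iff_mem_keys _ _).mp hc
        have hadd : PySem.Set.add dA.keys p.1 = dA.keys := by
          simp [PySem.Set.add, hmem]
        simp [PySem.Set.update, hadd]
      · intro k
        rw [ihv k, PySem.Dict.getD_insert]
        by_cases hk : k = p.1
        · subst hk
          simp [List.any_cons, beq_eq_decide, eq_comm, Bool.or_assoc]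
        · simp [hk, List.any_cons, Ne.symm hk, beq_eq_decide, Bool.or_assoc]
    · have hc' : dA.contains p.1 = false := by simpa using hc
      simp only [hc', Bool.false_eq_true, if_false]
      rw [PySem.Dict.getD_insert_self, PySem.Dict.insert_insert_self]
      obtain ⟨ihk, ihv⟩ := ih (dA.insert p.1 ([] ++ [p.2.1]))
      refine ⟨?_, ?_⟩
      · rw [ihk, PySem.Dict.keys_insert_of_not_contains _ _ hc']
        have hmem : p.1 ∉ dA.keys := fun h =>
          (by simp [hc'] at * : ¬ dA.contains p.1 = true)
            ((PySem.Dict.contains_iff_mem_keys _ _).mpr h)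
        have hadd : PySem.Set.add dA.keys p.1 = dA.keys ++ [p.1] := by
          simp [PySem.Set.add, hmem]
        simp [PySem.Set.update, hadd]
      · intro k
        rw [ihv k, PySem.Dict.getD_insert]
        by_cases hk : k = p.1
        · subst hk
          rw [PySem.Dict.getD_of_not_contains dA [] hc']
          simp [List.any_cons, beq_eq_decide, eq_comm, Bool.or_assoc]
        · simp [hk, List.any_cons, Ne.symm hk, beq_eq_decide, Bool.or_assoc]

-- A's output loop is a filter over the key list.
theorem foldl_skip_if (P : Int → Bool) (keys acc : List Int) :
    keys.foldl (fun ids key => if P key then ids else ids ++ [key]) acc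
      = acc ++ keys.filter (fun k => !P k) := by
  induction keys generalizing acc with
  | nil => simp
  | cons h t ih =>
    by_cases hP : P h = true <;> simp [hP, ih]

-- set(xs) commutes with filtering: filter r (ofList xs) = ofList (filter r xs).
theorem filter_foldl_add (r : Int → Bool) (xs s : List Int) :
    (xs.foldl PySem.Set.add s).filter r = (xs.filter r).foldl PySem.Set.add (s.filter r) := by
  induction xs generalizing s with
  | nil => simp
  | cons x t ih =>
    simp only [List.foldl_cons, List.filter_cons]
    by_cases hr : r x = true
    · simp only [hr, if_true, List.foldl_cons]
      rw [ih]
      congr 1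
      by_cases hm : x ∈ s
      · have hm' : x ∈ s.filter r := List.mem_filter.mpr ⟨hm, hr⟩
        simp [PySem.Set.add, hm, hm']
      · have hm' : x ∉ s.filter r := fun h => hm (List.mem_filter.mp h).1
        simp [PySem.Set.add, hm, hm', List.filter_append, hr]
    · have hr' : r x = false := by simpa using hr
      simp only [hr', Bool.false_eq_true, if_false]
      rw [ih]
      congr 1
      by_cases hm : x ∈ s
      · simp [PySem.Set.add, hm]
      · simp [PySem.Set.add, hm, List.filter_append, hr']

theorem ofList_filter (r : Int → Bool) (xs : List Int) :
    (PySem.Set.ofList xs).filter r = PySem.Set.ofList (xs.filter r) := by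
  rw [PySem.Set.ofList_eq_foldl, PySem.Set.ofList_eq_foldl, filter_foldl_add]
  rfl

-- covered.contains k decides "some (k, cls_id) pair occurs in l".
theorem covered_contains (cls_id k : Int) (l : List (Int × Int × Int)) :
    PySem.Set.contains
        (PySem.Set.ofList ((l.filter (fun p => p.2.1 == cls_id)).map (fun p => p.1))) k
      = l.any (fun p => p.1 == k && p.2.1 == cls_id) := by
  rcases h : l.any (fun p => p.1 == k && p.2.1 == cls_id) with _ | _
  · simp only [List.any_eq_false] at h
    rw [Bool.eq_false_iff]
    intro hc
    have := (PySem.Set.contains_iff _ _).mp hc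
    rw [PySem.Set.mem_ofList] at this
    obtain ⟨p, hp, hp1⟩ := List.mem_map.mp this
    obtain ⟨hpl, hp2⟩ := List.mem_filter.mp hp
    have := h p hpl
    simp [hp1, hp2] at this
  · simp only [List.any_eq_true] at h
    obtain ⟨p, hpl, hp⟩ := h
    simp only [Bool.and_eq_true, beq_iff_eq] at hp
    apply (PySem.Set.contains_iff _ _).mpr
    rw [PySem.Set.mem_ofList]
    exact List.mem_map.mpr ⟨p, List.mem_filter.mpr ⟨hpl, by simp [hp.2]⟩, hp.1⟩

-- filter of a map-by-fst vs map of filter-on-fst.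
theorem map_fst_filter (q : Int → Bool) (l : List (Int × Int × Int)) :
    (l.filter (fun p => q p.1)).map (fun p => p.1) = (l.map (fun p => p.1)).filter q := by
  induction l with
  | nil => rfl
  | cons p t ih =>
    by_cases h : q p.1 = true <;> simp [List.filter_cons, h, ih]

-- ===== VERDICT (by name: the statement is the Claim_ definition above) =====
theorem get_no_pred_id_spec : Claim_equal_get_no_pred_id := by
  intro max_score cls_id _
  unfold Spec_get_no_pred_id get_no_pred_id get_no_pred_id_alt
  obtain ⟨hk, hv⟩ := buildA_char cls_id max_score PySem.Dict.empty
  simp only [PySem.Dict.getD_empty, List.contains_nil, Bool.false_or] at hv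
  rw [foldl_skip_if, List.nil_append,
      List.filter_congr (q := fun k => !(max_score.any fun p => p.1 == k && p.2.1 == cls_id))
        (fun k _ => by rw [hv k]), hk]
  have hkeys : PySem.Set.update (PySem.Dict.empty (κ := Int) (ν := List Int)).keys
      (max_score.map (fun p => p.1)) = PySem.Set.ofList (max_score.map (fun p => p.1)) := by
    rw [PySem.Set.ofList_eq_foldl]; rfl
  rw [hkeys, PySem.List.dedup_eq_ofList,
      List.filter_congr
        (q := fun p : Int × Int × Int => !(max_score.any fun r => r.1 == p.1 && r.2.1 == cls_id))
        (fun p _ => by rw [covered_contains cls_id p.1 max_score]),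
      map_fst_filter (fun k => !(max_score.any fun r => r.1 == k && r.2.1 == cls_id)),
      ← ofList_filter]
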